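-- pv_equiv track=rewrite | github.com/AbhishekDuddupudi/SQL_Agent_Chatbot | backend/app/services/sql_exec.py | sanity_check_results
-- ===== SOURCE A (Python) =====
-- from typing import List, Dict, Any, Tuple, Optional
--
-- def sanity_check_results(
--     columns: List[str],
--     rows: List[Dict[str, Any]],
--     row_count: int
-- ) -> Tuple[bool, Optional[str]]:
--     """
--     Perform sanity checks on query results.
--
--     Args:
--         columns: Column names
--         rows: Result rows
--         row_count: Total row count
--
--     Returns:
--         Tuple of (is_valid, warning_message)
--     """
--     warnings = []
--
--     # Check for empty results
--     if row_count == 0: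
--         return True, "Query returned no results."
--
--     # Check for suspiciously large result sets
--     if row_count > 10000:
--         warnings.append(f"Very large result set ({row_count} rows). Consider adding filters.")
--
--     # Check for potential null-heavy columns
--     if rows:
--         for col in columns:
--             null_count = sum(1 for row in rows if row.get(col) is None)
--             if null_count == len(rows):
--                 warnings.append(f"Column '{col}' contains only NULL values.")
--
--     warning_msg = ' '.join(warnings) if warnings else None
--     return True, warning_msg
-- ===== SOURCE B (Python) =====
-- def sanity_check_results(columns, rows, row_count):
--     if row_count == 0:
--         return True, "Query returned no results."
--     # one pass over rows: the set of columns ever seen with a non-NULL value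
--     seen = set()
--     for row in rows:
--         seen.update(k for k, v in row.items() if v is not None)
--     null_warns = [] if not rows else [
--         f"Column '{c}' contains only NULL values." for c in columns if c not in seen
--     ]
--     big = [f"Very large result set ({row_count} rows). Consider adding filters."] if row_count > 10000 else []
--     parts = big + null_warns
--     return True, ' '.join(parts) if parts else None
-- ===== Notes on version B (the rewrite author's own statement) =====
-- stated objective: faster
-- what changed: Replaces A's per-column re-scan of all rows (summing nulls for each column) with one pass over all row items building the set of columns ever seen non-NULL, after which the warning list is produced by a filter+map over columns; a column is all-NULL iff absent from that set.
import Mathlib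
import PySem

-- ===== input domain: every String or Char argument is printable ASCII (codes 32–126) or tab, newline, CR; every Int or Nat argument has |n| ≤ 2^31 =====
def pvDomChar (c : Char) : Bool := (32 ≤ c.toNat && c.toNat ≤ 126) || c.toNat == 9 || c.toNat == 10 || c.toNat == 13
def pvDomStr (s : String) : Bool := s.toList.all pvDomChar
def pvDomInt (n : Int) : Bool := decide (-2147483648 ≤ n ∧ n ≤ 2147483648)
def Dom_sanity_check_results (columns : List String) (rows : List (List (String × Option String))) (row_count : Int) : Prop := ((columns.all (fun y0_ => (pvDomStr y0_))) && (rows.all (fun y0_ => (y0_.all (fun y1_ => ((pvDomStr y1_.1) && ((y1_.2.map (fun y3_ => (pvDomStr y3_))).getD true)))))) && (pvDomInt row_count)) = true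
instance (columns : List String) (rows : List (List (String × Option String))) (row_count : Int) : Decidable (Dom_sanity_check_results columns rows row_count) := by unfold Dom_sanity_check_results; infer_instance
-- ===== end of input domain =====

-- ===== PORT A =====
-- B replaces A's per-column null-count scan of all rows with one pass over all row items
-- collecting the set of columns seen with a non-NULL value; asymptotically fewer lookups.

-- row.get(col): first-match association lookup, None when missing or stored as None
def pvRowGet (row : List (String × Option String)) (col : String) : Option String :=
  (PySem.Dict.mk row).getD col none

def sanity_check_results (columns : List String) (rows : List (List (String × Option String))) (row_count : Int) : Bool × Option String :=
  if row_count = 0 then (true, some "Query returned no results.")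
  else
    let warnings : List String :=
      if row_count > 10000 then
        ["Very large result set (" ++ PySem.Int.toStr row_count ++ " rows). Consider adding filters."]
      else []
    let warnings :=
      if rows.isEmpty then warnings
      else
        columns.foldl (fun acc col =>
          let nullCount : Int :=
            rows.foldl (fun n row => if pvRowGet row col == none then n + 1 else n) 0
          if nullCount = (rows.length : Int) then
            acc ++ ["Column '" ++ col ++ "' contains only NULL values."]
          else acc) warnings
    (true, if warnings.isEmpty then none else some (PySem.Str.join " " warnings))

-- ===== PORT B =====
-- one pass over rows (structural recursion): seen.update(k for k, v in row.items() if v is not None)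
def pvSeenCols : List (List (String × Option String)) → PySem.Set String → PySem.Set String
  | [], seen => seen
  | row :: rest, seen =>
      pvSeenCols rest (PySem.Set.update seen ((row.filter (fun kv => kv.2.isSome)).map Prod.fst))

def sanity_check_results_alt (columns : List String) (rows : List (List (String × Option String))) (row_count : Int) : Bool × Option String :=
  if row_count = 0 then (true, some "Query returned no results.")
  else
    let seen := pvSeenCols rows PySem.Set.empty
    let nullWarns : List String :=
      if rows.isEmpty then []
      else (columns.filter (fun c => !(PySem.Set.contains seen c))).map
             (fun c => "Column '" ++ c ++ "' contains only NULL values.")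
    let big : List String :=
      if row_count > 10000 then
        ["Very large result set (" ++ PySem.Int.toStr row_count ++ " rows). Consider adding filters."]
      else []
    let parts := big ++ nullWarns
    (true, if parts.isEmpty then none else some (PySem.Str.join " " parts))

-- ===== PRECONDITION & SPEC =====
-- Pre_ excludes rows whose association list repeats a key: a Python dict can never hold
-- duplicate keys, so such inputs are artefacts of the assoc-list encoding, not inputs of A.
def Pre_sanity_check_results (columns : List String) (rows : List (List (String × Option String))) (row_count : Int) : Prop :=
  ∀ row ∈ rows, (row.map Prod.fst).Nodup
instance (columns : List String) (rows : List (List (String × Option String))) (row_count : Int) : Decidable (Pre_sanity_check_results columns rows row_count) := by unfold Pre_sanity_check_results; infer_instance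

def pvWitness_sanity_check_results : List String × (List (List (String × Option String))) × Int :=
  (["a", "b"], [[("a", none), ("b", some "x")], [("a", none)]], 2)

def Spec_sanity_check_results (columns : List String) (rows : List (List (String × Option String))) (row_count : Int) (out : Bool × Option String) : Prop := out = sanity_check_results_alt columns rows row_count
instance (columns : List String) (rows : List (List (String × Option String))) (row_count : Int) (out : Bool × Option String) : Decidable (Spec_sanity_check_results columns rows row_count out) := by unfold Spec_sanity_check_results; infer_instance

-- ===== CLAIM (what is proved, stated in full; the proofs are below) =====
def Claim_equal_sanity_check_results : Prop := ∀ (columns : List String) (rows : List (List (String × Option String))) (row_count : Int), Dom_sanity_check_results columns rows row_count → Pre_sanity_check_results columns rows row_count → Spec_sanity_check_results columns rows row_count (sanity_check_results columns rows row_count)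

-- ===== LEMMAS AND PROOFS =====

-- membership in the seen (non-null) column set
lemma mem_pvSeenCols (rows : List (List (String × Option String))) (s : PySem.Set String) (col : String) :
    col ∈ pvSeenCols rows s ↔ col ∈ s ∨ ∃ row ∈ rows, ∃ v, (col, some v) ∈ row := by
  induction rows generalizing s with
  | nil => simp [pvSeenCols]
  | cons row rest ih =>
    rw [pvSeenCols, ih, PySem.Set.mem_update]
    simp only [List.mem_map, List.mem_filter, List.mem_cons]
    constructor
    · rintro (⟨h | ⟨⟨k, v⟩, ⟨hkv, hv⟩, rfl⟩⟩ | ⟨r, hr, u, hu⟩)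
      · exact Or.inl h
      · obtain ⟨w, rfl⟩ := Option.isSome_iff_exists.mp hv
        exact Or.inr ⟨row, Or.inl rfl, w, hkv⟩
      · exact Or.inr ⟨r, Or.inr hr, u, hu⟩
    · rintro (h | ⟨r, rfl | hr, u, hu⟩)
      · exact Or.inl (Or.inl h)
      · exact Or.inl (Or.inr ⟨(col, some u), ⟨hu, rfl⟩, rfl⟩)
      · exact Or.inr ⟨r, hr, u, hu⟩

-- on a duplicate-free row, row.get(col) is None iff col never carries a non-NULL value
lemma pvRowGet_none_iff (row : List (String × Option String)) (col : String)
    (h : (row.map Prod.fst).Nodup) :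
    (pvRowGet row col = none) ↔ ¬ ∃ v, (col, some v) ∈ row := by
  induction row with
  | nil => simp [pvRowGet, PySem.Dict.getD, PySem.Dict.get?]
  | cons kv rest ih =>
    obtain ⟨k, v⟩ := kv
    simp only [List.map_cons, List.nodup_cons] at h
    obtain ⟨hk, hrest⟩ := h
    by_cases hkc : k = col
    · have hget : pvRowGet ((k, v) :: rest) col = v := by
        simp [pvRowGet, PySem.Dict.getD, PySem.Dict.get?, List.find?, hkc]
      have hnorest : ¬ ∃ u, (col, some u) ∈ rest := by
        rintro ⟨u, hu⟩
        exact hk (by rw [hkc]; exact List.mem_map_of_mem hu)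
      rw [hget]
      cases v with
      | none =>
        simp only [List.mem_cons]
        constructor
        · rintro - ⟨u, hu | hu⟩
          · exact (by injection hu with h1 h2; cases h2)
          · exact hnorest ⟨u, hu⟩
        · intro _; trivial
      | some w =>
        simp only [List.mem_cons]
        constructor
        · intro hc; cases hc
        · intro hc; exact absurd ⟨w, Or.inl (by rw [hkc])⟩ hc
    · have hkc' : (k == col) = false := beq_eq_false_iff_ne.mpr hkc
      have hget : pvRowGet ((k, v) :: rest) col = pvRowGet rest col := by
        simp [pvRowGet, PySem.Dict.getD, PySem.Dict.get?, List.find?, hkc']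
      rw [hget, ih hrest]
      simp only [List.mem_cons]
      constructor
      · rintro hn ⟨u, hu | hu⟩
        · exact hkc (by injection hu with h1 h2; rw [h1])
        · exact hn ⟨u, hu⟩
      · rintro hn ⟨u, hu⟩
        exact hn ⟨u, Or.inr hu⟩

-- A's per-column all-NULL test agrees with absence from the seen set (duplicate-free rows)
lemma cond_agree (rows : List (List (String × Option String))) (col : String)
    (hpre : ∀ row ∈ rows, (row.map Prod.fst).Nodup) :
    ((rows.foldl (fun n row => if pvRowGet row col == none then n + 1 else n) (0 : Int))
        = (rows.length : Int))
      ↔ (!(PySem.Set.contains (pvSeenCols rows PySem.Set.empty) col)) = true := by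
  rw [PySem.List.foldl_count_if (fun row => pvRowGet row col == none) rows 0, zero_add]
  rw [show ((rows.countP (fun row => pvRowGet row col == none) : Int) = (rows.length : Int)) ↔
        rows.countP (fun row => pvRowGet row col == none) = rows.length from Int.ofNat_inj]
  rw [List.countP_eq_length, Bool.not_eq_eq_eq_not, Bool.not_true,
      show (PySem.Set.contains (pvSeenCols rows PySem.Set.empty) col = false) ↔
        col ∉ pvSeenCols rows PySem.Set.empty from
        by rw [← Bool.not_eq_true, PySem.Set.contains_iff]]
  rw [mem_pvSeenCols]
  simp only [PySem.Set.empty, List.not_mem_nil, false_or]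
  constructor
  · rintro hall ⟨r, hr, u, hu⟩
    have := hall r hr
    rw [beq_iff_eq, pvRowGet_none_iff r col (hpre r hr)] at this
    exact this ⟨u, hu⟩
  · intro hnone r hr
    rw [beq_iff_eq, pvRowGet_none_iff r col (hpre r hr)]
    rintro ⟨u, hu⟩
    exact hnone ⟨r, hr, u, hu⟩

-- ===== VERDICT (by name: the statement is the Claim_ definition above) =====
theorem sanity_check_results_spec : Claim_equal_sanity_check_results := by
  intro columns rows row_count _ hpre
  unfold Spec_sanity_check_results sanity_check_results sanity_check_results_alt
  by_cases h0 : row_count = 0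
  · simp [h0]
  · simp only [if_neg h0]
    by_cases hemp : rows.isEmpty
    · simp [hemp]
    · have hfold : ∀ init : List String,
          columns.foldl (fun acc col =>
            let nullCount : Int :=
              rows.foldl (fun n row => if pvRowGet row col == none then n + 1 else n) 0
            if nullCount = (rows.length : Int) then
              acc ++ ["Column '" ++ col ++ "' contains only NULL values."]
            else acc) init
          = init ++ (columns.filter (fun c => !(PySem.Set.contains (pvSeenCols rows PySem.Set.empty) c))).map
              (fun c => "Column '" ++ c ++ "' contains only NULL values.") := by
        intro init
        rw [PySem.List.foldl_congr_mem' columns _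
              (fun acc col =>
                if (!(PySem.Set.contains (pvSeenCols rows PySem.Set.empty) col)) then
                  acc ++ ["Column '" ++ col ++ "' contains only NULL values."]
                else acc)
              init
              (by intro col _ acc
                  simp only
                  by_cases hc : (!(PySem.Set.contains (pvSeenCols rows PySem.Set.empty) col)) = true
                  · rw [if_pos ((cond_agree rows col hpre).mpr hc), if_pos hc]
                  · rw [if_neg (fun h => hc ((cond_agree rows col hpre).mp h)), if_neg hc])]
        exact PySem.List.foldl_append_if _ _ _ _
      simp only [if_neg hemp, hfold]
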